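-- pv_equiv track=rewrite | github.com/sadov-m/readability | text_transform_and_classify_1_to_4.py | get_accent_syl_id
-- ===== SOURCE A (Python) =====
-- def get_accent_syl_id(accentuated_char_id, list_of_syls_lengths):
--     last = len(list_of_syls_lengths) - 1
--
--     for k in range(len(list_of_syls_lengths)):
--         if k == 0:
--             if 0 <= accentuated_char_id < list_of_syls_lengths[0]:
--                 return 0
--         elif k == last:
--             if sum(list_of_syls_lengths[:k]) <= accentuated_char_id:
--                 return last
--         else:
--             if sum(list_of_syls_lengths[:k]) <= accentuated_char_id < sum(list_of_syls_lengths[:k+1]):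
--                 return k
-- ===== SOURCE B (Python) =====
-- def get_accent_syl_id(accentuated_char_id, list_of_syls_lengths):
--     n = len(list_of_syls_lengths)
--     if n == 0:
--         return None
--     if 0 <= accentuated_char_id < list_of_syls_lengths[0]:
--         return 0
--     prefix = list_of_syls_lengths[0]
--     for k in range(1, n - 1):
--         nxt = prefix + list_of_syls_lengths[k]
--         if prefix <= accentuated_char_id < nxt:
--             return k
--         prefix = nxt
--     if n > 1 and prefix <= accentuated_char_id:
--         return n - 1
--     return None
-- ===== Notes on version B (the rewrite author's own statement) =====
-- stated objective: faster
-- what changed: Replace A's loop that recomputes sum(list[:k]) from scratch at every index with a single pass maintaining a running prefix sum (first-syllable and last-syllable checks pulled out of the loop).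
import Mathlib
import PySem

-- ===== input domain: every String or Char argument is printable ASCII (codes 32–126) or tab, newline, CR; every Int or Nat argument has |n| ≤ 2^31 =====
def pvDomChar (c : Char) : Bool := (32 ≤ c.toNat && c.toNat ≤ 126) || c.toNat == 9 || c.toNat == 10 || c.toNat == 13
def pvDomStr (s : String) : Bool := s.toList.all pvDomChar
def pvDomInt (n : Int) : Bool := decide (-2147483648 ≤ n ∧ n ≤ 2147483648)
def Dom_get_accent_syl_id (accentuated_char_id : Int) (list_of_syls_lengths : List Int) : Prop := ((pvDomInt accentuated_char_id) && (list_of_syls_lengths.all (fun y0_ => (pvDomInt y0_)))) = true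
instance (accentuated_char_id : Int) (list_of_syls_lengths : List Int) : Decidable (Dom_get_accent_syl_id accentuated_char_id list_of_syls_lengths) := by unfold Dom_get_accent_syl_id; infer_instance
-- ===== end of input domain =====

-- B replaces A's per-index recomputation of sum(list[:k]) by a single pass with a
-- running prefix sum (objective: faster).

-- ===== PORT A =====
-- A's for-loop over range(len(L)) with early returns, as structural recursion over
-- the list of loop indices.  sum(L[:k]) with 0 ≤ k is (L.take k).sum (exact here since
-- k is a loop index in [0, len L)); L[0] is only read when the loop runs, i.e. L ≠ [],
-- so L.headD 0 is exact there.
def aGo (accentuated_char_id : Int) (L : List Int) (last : Int) : List Nat → Option Int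
  | [] => none
  | k :: ks =>
    if k = 0 then
      if 0 ≤ accentuated_char_id ∧ accentuated_char_id < L.headD 0 then some 0
      else aGo accentuated_char_id L last ks
    else if (k : Int) = last then
      if (L.take k).sum ≤ accentuated_char_id then some last
      else aGo accentuated_char_id L last ks
    else
      if (L.take k).sum ≤ accentuated_char_id ∧ accentuated_char_id < (L.take (k + 1)).sum then some (k : Int)
      else aGo accentuated_char_id L last ks

def get_accent_syl_id (accentuated_char_id : Int) (list_of_syls_lengths : List Int) : Option Int :=
  let last : Int := (list_of_syls_lengths.length : Int) - 1
  aGo accentuated_char_id list_of_syls_lengths last (List.range list_of_syls_lengths.length)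

-- ===== PORT B =====
-- B's middle loop: running prefix sum over k = 1 .. n-2; returns the final prefix
-- together with the early-return result (L[k] is in range for every loop index, so
-- L.getD k 0 is exact there).
def bLoop (accentuated_char_id : Int) (L : List Int) (prefix0 : Int) : List Nat → Int × Option Int
  | [] => (prefix0, none)
  | k :: ks =>
    let nxt := prefix0 + L.getD k 0
    if prefix0 ≤ accentuated_char_id ∧ accentuated_char_id < nxt then (prefix0, some (k : Int))
    else bLoop accentuated_char_id L nxt ks

def get_accent_syl_id_alt (accentuated_char_id : Int) (list_of_syls_lengths : List Int) : Option Int :=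
  let n := list_of_syls_lengths.length
  if n = 0 then none
  else if 0 ≤ accentuated_char_id ∧ accentuated_char_id < list_of_syls_lengths.headD 0 then some 0
  else
    match bLoop accentuated_char_id list_of_syls_lengths (list_of_syls_lengths.headD 0)
      (List.range' 1 (n - 2)) with
    | (_, some k) => some k
    | (pfx, none) => if 1 < n ∧ pfx ≤ accentuated_char_id then some ((n : Int) - 1) else none

-- ===== PRECONDITION & SPEC =====
def Spec_get_accent_syl_id (accentuated_char_id : Int) (list_of_syls_lengths : List Int) (out : Option Int) : Prop := out = get_accent_syl_id_alt accentuated_char_id list_of_syls_lengths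
instance (accentuated_char_id : Int) (list_of_syls_lengths : List Int) (out : Option Int) : Decidable (Spec_get_accent_syl_id accentuated_char_id list_of_syls_lengths out) := by unfold Spec_get_accent_syl_id; infer_instance

-- ===== CLAIM (what is proved, stated in full; the proofs are below) =====
def Claim_equal_get_accent_syl_id : Prop := ∀ (accentuated_char_id : Int) (list_of_syls_lengths : List Int), Dom_get_accent_syl_id accentuated_char_id list_of_syls_lengths → Spec_get_accent_syl_id accentuated_char_id list_of_syls_lengths (get_accent_syl_id accentuated_char_id list_of_syls_lengths)

-- ===== LEMMAS AND PROOFS =====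

-- Key loop correspondence: A's remaining iterations (middle indices range' k₀ m, then
-- the last index n-1) compute the same result as B's running-prefix-sum loop over
-- range' k₀ m followed by B's final last-syllable check, provided the running prefix
-- equals (L.take k₀).sum.
theorem loop_corr (id : Int) (L : List Int) (m k₀ : Nat)
    (hk : 1 ≤ k₀) (hend : k₀ + m + 1 = L.length) :
    aGo id L ((L.length : Int) - 1) (List.range' k₀ m ++ [L.length - 1]) =
      (match bLoop id L ((L.take k₀).sum) (List.range' k₀ m) with
       | (_, some k) => some k
       | (pfx, none) => if pfx ≤ id then some ((L.length : Int) - 1) else none) := by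
  induction m generalizing k₀ with
  | zero =>
    simp only [List.range'_zero, List.nil_append, bLoop]
    rw [show L.length - 1 = k₀ from by omega]
    have h1 : k₀ ≠ 0 := by omega
    have h2 : (k₀ : Int) = (L.length : Int) - 1 := by omega
    simp [aGo, h1, h2]
  | succ m ih =>
    rw [List.range'_succ]
    have hk0 : k₀ ≠ 0 := by omega
    have hne : (k₀ : Int) ≠ (L.length : Int) - 1 := by omega
    have hlt : k₀ < L.length := by omega
    have hsum : (L.take (k₀ + 1)).sum = (L.take k₀).sum + L.getD k₀ 0 := by
      rw [List.sum_take_succ L k₀ hlt, List.getD_eq_getElem L 0 hlt]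
    simp only [List.cons_append, aGo, bLoop, hk0, hne, if_false]
    by_cases hcond : (L.take k₀).sum ≤ id ∧ id < (L.take (k₀ + 1)).sum
    · rw [if_pos hcond, if_pos (by rw [← hsum]; exact hcond)]
    · rw [if_neg hcond, if_neg (by rw [← hsum]; exact hcond), ← hsum]
      exact ih (k₀ + 1) (by omega) (by omega)

theorem ab_eq (id : Int) (L : List Int) :
    get_accent_syl_id id L = get_accent_syl_id_alt id L := by
  match L with
  | [] => rfl
  | x :: xs =>
    unfold get_accent_syl_id get_accent_syl_id_alt
    rw [if_neg (show ¬ ((x :: xs).length = 0) from by simp)]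
    rw [show List.range (x :: xs).length = 0 :: List.range' 1 xs.length from by
      rw [List.length_cons, List.range_eq_range', List.range'_succ]]
    simp only [aGo, if_true]
    by_cases h0 : 0 ≤ id ∧ id < (x :: xs).headD 0
    · rw [if_pos h0, if_pos h0]
    · rw [if_neg h0, if_neg h0]
      match xs with
      | [] => simp [bLoop, aGo]
      | y :: ys =>
        have hsplit : List.range' 1 ((y :: ys).length) =
            List.range' 1 ((y :: ys).length - 1) ++ [(x :: y :: ys).length - 1] := by
          rw [show (y :: ys).length = ((y :: ys).length - 1) + 1 from by simp]
          rw [List.range'_concat]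
          simp
          omega
        rw [hsplit]
        have h2 : (x :: y :: ys).length - 2 = (y :: ys).length - 1 := by simp
        have hpre : (x :: y :: ys).headD 0 = ((x :: y :: ys).take 1).sum := by simp
        rw [h2, hpre,
          loop_corr id (x :: y :: ys) ((y :: ys).length - 1) 1 (by omega) (by simp; omega)]
        cases hbl : bLoop id (x :: y :: ys) ((List.take 1 (x :: y :: ys)).sum)
            (List.range' 1 ((y :: ys).length - 1)) with
        | mk pfx res =>
          cases res with
          | none => simp
          | some k => simp

-- ===== VERDICT (by name: the statement is the Claim_ definition above) =====
theorem get_accent_syl_id_spec : Claim_equal_get_accent_syl_id := by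
  intro id L _
  exact ab_eq id L
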